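-- pv_equiv track=rewrite | github.com/pypi-data/pypi-mirror-96 | packages/pcsg/pcsg-0.0.3-py3-none-any.whl/pcsg/util/__init__.py | _breakLineSplitPos
-- ===== SOURCE A (Python) =====
-- def _breakLineSplitPos (text, maxWidth):
--     """
--     Get position for text splitting.
--     """
--     if len (text) < maxWidth:
--         return len (text)
--     lastSplitPos = None
--     for i in range (1, len (text)):
--         if text[i] == " " or text[i] == "\t" or text[i] == "\n":
--             if (i >= maxWidth):
--                 if lastSplitPos == None:
--                     return maxWidth
--                 else:
--                     return lastSplitPos
--             lastSplitPos = i
--     if lastSplitPos == None: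
--         return maxWidth
--     else:
--         return lastSplitPos
-- ===== SOURCE B (Python) =====
-- def _breakLineSplitPos(text, maxWidth):
--     """
--     Get position for text splitting.
--     """
--     if len(text) < maxWidth:
--         return len(text)
--     for i in range(maxWidth - 1, 0, -1):
--         if text[i] in " \t\n":
--             return i
--     return maxWidth
-- ===== Notes on version B (the rewrite author's own statement) =====
-- stated objective: simpler
-- what changed: Replaces A's forward scan over all of range(1, len(text)) with a lastSplitPos accumulator and an early-exit sentinel by a stateless backwards scan over range(maxWidth-1, 0, -1) that returns the first whitespace index it meets.
import Mathlib
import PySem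

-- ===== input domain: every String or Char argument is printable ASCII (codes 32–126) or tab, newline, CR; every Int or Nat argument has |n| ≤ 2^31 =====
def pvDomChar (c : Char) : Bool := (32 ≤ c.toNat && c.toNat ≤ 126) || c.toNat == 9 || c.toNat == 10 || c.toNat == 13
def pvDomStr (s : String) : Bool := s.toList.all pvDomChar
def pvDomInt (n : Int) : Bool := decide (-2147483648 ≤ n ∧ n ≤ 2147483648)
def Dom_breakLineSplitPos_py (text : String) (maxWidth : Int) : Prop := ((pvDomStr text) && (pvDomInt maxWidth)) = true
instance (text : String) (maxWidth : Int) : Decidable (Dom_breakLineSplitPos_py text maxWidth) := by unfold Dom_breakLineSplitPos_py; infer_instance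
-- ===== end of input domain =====

-- B replaces A's forward scan (accumulator + early-exit sentinel) by a direct backwards scan
-- over range(maxWidth-1, 0, -1) returning the first whitespace index it meets (objective: simpler).

-- ===== PORT A =====
-- the for-loop of A: state = lastSplitPos (Option Int), iterating over range(1, len(text))
def pvALoop (cs : List Char) (maxWidth : Int) : List Int → Option Int → Int
  | [], last =>
    match last with
    | none => maxWidth
    | some p => p
  | i :: rest, last =>
    match PySem.List.pyGet? cs i with
    | some c =>
      if c = ' ' || c = '\t' || c = '\n' then
        if maxWidth ≤ i then
          match last with
          | none => maxWidth
          | some p => p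
        else pvALoop cs maxWidth rest (some i)
      else pvALoop cs maxWidth rest last
    | none => pvALoop cs maxWidth rest last

def breakLineSplitPos_py (text : String) (maxWidth : Int) : Int :=
  let cs := text.toList
  if (cs.length : Int) < maxWidth then (cs.length : Int)
  else pvALoop cs maxWidth (PySem.List.pyRange 1 (cs.length : Int) 1) none

-- ===== PORT B =====
-- the for-loop of B: no loop state, the first hit scanning down from maxWidth-1 wins
def pvBLoop (cs : List Char) : List Int → Option Int
  | [] => none
  | i :: rest =>
    match PySem.List.pyGet? cs i with
    | some c => if ([' ', '\t', '\n'] : List Char).contains c then some i else pvBLoop cs rest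
    | none => pvBLoop cs rest

def breakLineSplitPos_py_alt (text : String) (maxWidth : Int) : Int :=
  let cs := text.toList
  if (cs.length : Int) < maxWidth then (cs.length : Int)
  else
    match pvBLoop cs (PySem.List.pyRange (maxWidth - 1) 0 (-1)) with
    | some i => i
    | none => maxWidth

-- ===== PRECONDITION & SPEC =====
def Spec_breakLineSplitPos_py (text : String) (maxWidth : Int) (out : Int) : Prop := out = breakLineSplitPos_py_alt text maxWidth
instance (text : String) (maxWidth : Int) (out : Int) : Decidable (Spec_breakLineSplitPos_py text maxWidth out) := by unfold Spec_breakLineSplitPos_py; infer_instance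

-- ===== CLAIM (what is proved, stated in full; the proofs are below) =====
def Claim_equal_breakLineSplitPos_py : Prop := ∀ (text : String) (maxWidth : Int), Dom_breakLineSplitPos_py text maxWidth → Spec_breakLineSplitPos_py text maxWidth (breakLineSplitPos_py text maxWidth)

-- ===== LEMMAS AND PROOFS =====

-- "text[i] is a split character" (false also when i is out of range, which the loops skip)
def pvGood (cs : List Char) (i : Int) : Bool :=
  match PySem.List.pyGet? cs i with
  | some c => c = ' ' || c = '\t' || c = '\n'
  | none => false

theorem pvContains_ws (c : Char) :
    (([' ', '\t', '\n'] : List Char).contains c) = (c = ' ' || c = '\t' || c = '\n') := by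
  simp [Bool.or_assoc]

-- B's loop is find? of pvGood
theorem pvBLoop_eq_find? (cs : List Char) (L : List Int) :
    pvBLoop cs L = L.find? (pvGood cs) := by
  induction L with
  | nil => rfl
  | cons i rest ih =>
    rw [List.find?_cons]
    cases hg : pvGood cs i with
    | true =>
      unfold pvGood at hg
      cases h : PySem.List.pyGet? cs i with
      | none => rw [h] at hg; simp at hg
      | some c =>
        rw [h] at hg
        simp only [pvBLoop, h, pvContains_ws, hg, if_true]
    | false =>
      unfold pvGood at hg
      cases h : PySem.List.pyGet? cs i with
      | none => simp only [pvBLoop, h, ih]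
      | some c =>
        rw [h] at hg
        simp only [pvBLoop, h, pvContains_ws, hg, if_false, Bool.false_eq_true, ih]

theorem getLast?_cons_getD {α : Type} (a d : α) (l : List α) :
    ((a::l).getLast?).getD d = (l.getLast?).getD a := by
  rw [List.getLast?_cons]
  simp

-- A's loop, on a strictly increasing index list, returns the last index i with pvGood i and
-- i < maxWidth; if there is none, the accumulator (then maxWidth)
theorem pvALoop_eq_getLast? (cs : List Char) (mw : Int) (L : List Int) (last : Option Int)
    (hL : L.Pairwise (· < ·)) :
    pvALoop cs mw L last =
      ((L.filter (fun i => pvGood cs i && decide (i < mw))).getLast?).getD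
        (match last with | none => mw | some p => p) := by
  induction L generalizing last with
  | nil => rfl
  | cons i rest ih =>
    have hrest : rest.Pairwise (· < ·) := hL.of_cons
    have hlt : ∀ j ∈ rest, i < j := fun j hj => (List.pairwise_cons.mp hL).1 j hj
    rw [List.filter_cons]
    cases h : PySem.List.pyGet? cs i with
    | none =>
      have hg : pvGood cs i = false := by simp [pvGood, h]
      simp only [pvALoop, h, hg, Bool.false_and, Bool.false_eq_true, if_false, ih _ hrest]
    | some c =>
      have hg : pvGood cs i = (c = ' ' || c = '\t' || c = '\n') := by simp [pvGood, h]
      by_cases hc : (c = ' ' || c = '\t' || c = '\n') = true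
      · by_cases hi : mw ≤ i
        · -- early return: nothing good and < mw remains in rest
          have hfr : rest.filter (fun j => pvGood cs j && decide (j < mw)) = [] := by
            apply List.filter_eq_nil_iff.mpr
            intro j hj
            have : mw < j := lt_of_le_of_lt hi (hlt j hj)
            simp [not_lt.mpr (le_of_lt this)]
          have hnlt : ¬ (i < mw) := not_lt.mpr hi
          simp only [pvALoop, h, hc, if_true, hi, hg, hnlt, decide_false,
            Bool.and_false, Bool.false_eq_true, if_false, hfr, List.getLast?_nil, Option.getD_none]
        · have hi' : (i < mw) := lt_of_not_ge hi
          simp only [pvALoop, h, hc, if_true, hi, if_false, hg, hi', decide_true,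
            Bool.and_true, ih _ hrest, getLast?_cons_getD]
      · have hg' : pvGood cs i = false := by rw [hg]; exact Bool.not_eq_true _ ▸ (by simpa using hc)
        simp only [pvALoop, h, hc, if_false, hg', Bool.false_and, Bool.false_eq_true, ih _ hrest]

-- find? on a reversed list is the last satisfying element
theorem find?_reverse_eq_getLast? {α : Type} (p : α → Bool) (l : List α) :
    l.reverse.find? p = (l.filter p).getLast? := by
  induction l with
  | nil => rfl
  | cons a l ih =>
    rw [List.reverse_cons, List.find?_append, ih, List.filter_cons]
    by_cases hp : p a = true
    · rw [if_pos hp]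
      have hfa : List.find? p [a] = some a := by simp [hp]
      rw [hfa]
      cases hfl : (l.filter p) with
      | nil => simp
      | cons b t => simp [List.getLast?_cons]
    · rw [if_neg hp]
      have hfa : List.find? p [a] = none := by simp [hp]
      rw [hfa, Option.or_none]

-- the two filtered index sets coincide when mw ≤ n
theorem filter_range_eq (cs : List Char) (mw n : Int) (hmn : mw ≤ n) :
    (PySem.List.pyRange 1 n 1).filter (fun i => pvGood cs i && decide (i < mw)) =
      (PySem.List.pyRange 1 mw 1).filter (pvGood cs) := by
  by_cases h1 : mw ≤ 1
  · rw [PySem.List.pyRange_one_eq_nil h1]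
    apply List.filter_eq_nil_iff.mpr
    intro j hj
    have := (PySem.List.mem_pyRange_one.mp hj).1
    have : ¬ (j < mw) := by omega
    simp [this]
  · have h1' : (1 : Int) ≤ mw := by omega
    rw [PySem.List.pyRange_one_append 1 mw n h1' hmn, List.filter_append]
    have h2 : (PySem.List.pyRange mw n 1).filter (fun i => pvGood cs i && decide (i < mw)) = [] := by
      apply List.filter_eq_nil_iff.mpr
      intro j hj
      have := (PySem.List.mem_pyRange_one.mp hj).1
      have : ¬ (j < mw) := by omega
      simp [this]
    have h3 : (PySem.List.pyRange 1 mw 1).filter (fun i => pvGood cs i && decide (i < mw)) =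
        (PySem.List.pyRange 1 mw 1).filter (pvGood cs) := by
      apply List.filter_congr
      intro j hj
      have := (PySem.List.mem_pyRange_one.mp hj).2
      simp [this]
    rw [h2, h3, List.append_nil]

-- ===== VERDICT (by name: the statement is the Claim_ definition above) =====
theorem breakLineSplitPos_py_spec : Claim_equal_breakLineSplitPos_py := by
  intro text maxWidth _
  unfold Spec_breakLineSplitPos_py breakLineSplitPos_py breakLineSplitPos_py_alt
  set cs := text.toList with hcs
  by_cases hlen : (cs.length : Int) < maxWidth
  · simp [hlen]
  · simp only [hlen, if_false]
    have hmn : maxWidth ≤ (cs.length : Int) := le_of_not_gt hlen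
    have hrev : PySem.List.pyRange (maxWidth - 1) 0 (-1) = (PySem.List.pyRange 1 maxWidth 1).reverse := by
      rw [PySem.List.pyRange_neg_one_eq_reverse]; norm_num
    rw [pvALoop_eq_getLast? cs maxWidth _ none (PySem.List.pairwise_lt_pyRange_one 1 _),
        pvBLoop_eq_find?, hrev, find?_reverse_eq_getLast?, filter_range_eq cs maxWidth _ hmn]
    cases ((PySem.List.pyRange 1 maxWidth 1).filter (pvGood cs)).getLast? <;> simp
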